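-- pv_equiv track=rewrite | github.com/Haris-Mughal/Advent_of_code-2024 | day_25/day_25_p1.py | schematic_to_heights
-- ===== SOURCE A (Python) =====
-- def schematic_to_heights(schematic):
--     cols = list(zip(*schematic))
--     heights = []
--     for col in cols:
--         if "#" in col:
--             height = len(col) - col[::-1].index("#") - 1
--         else:
--             height = 0
--         heights.append(height)
--     return heights
-- ===== SOURCE B (Python) =====
-- def schematic_to_heights(schematic):
--     if not schematic:
--         return []
--     n = min(len(r) for r in schematic)
--     heights = [0] * n
--     for j, row in enumerate(schematic):
--         for i, ch in enumerate(row[:n]):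
--             if ch == "#":
--                 heights[i] = j
--     return heights
-- ===== Notes on version B (the rewrite author's own statement) =====
-- stated objective: alternative
-- what changed: Replaces the transpose (zip(*rows)) plus per-column reverse .index scan with a single row-major forward pass that overwrites heights[i] with the current row index whenever a '#' is seen.
import Mathlib
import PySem

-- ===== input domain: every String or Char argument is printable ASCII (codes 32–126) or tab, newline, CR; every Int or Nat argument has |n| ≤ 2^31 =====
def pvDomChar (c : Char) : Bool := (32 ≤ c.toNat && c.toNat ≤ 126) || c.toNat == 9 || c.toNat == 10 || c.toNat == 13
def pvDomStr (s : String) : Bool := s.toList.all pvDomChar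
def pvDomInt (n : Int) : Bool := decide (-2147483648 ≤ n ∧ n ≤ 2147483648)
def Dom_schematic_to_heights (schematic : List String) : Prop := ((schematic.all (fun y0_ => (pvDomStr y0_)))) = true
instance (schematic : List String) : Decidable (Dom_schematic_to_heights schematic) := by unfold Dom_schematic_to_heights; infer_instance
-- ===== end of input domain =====

-- B replaces A's transpose (zip) plus per-column reverse .index scan with a single
-- row-major forward pass that overwrites heights[i] with the current row index at
-- each '#'; alternative decomposition, same asymptotic cost.

-- ===== PORT A =====
-- zip(*rows): truncating transpose, exactly Python's zip semantics
def pyZipStar (rows : List (List Char)) : List (List Char) :=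
  match rows with
  | [] => []
  | r :: rs =>
    if (r :: rs).all (fun l => !l.isEmpty) then
      ((r :: rs).map (fun l => l.headD ' ')) :: pyZipStar ((r :: rs).map List.tail)
    else []
termination_by (rows.headD []).length
decreasing_by
  simp_all [List.all_cons]
  cases r with
  | nil => simp at *
  | cons a t => simp

def schematic_to_heights (schematic : List String) : List Int :=
  let cols := pyZipStar (schematic.map String.toList)
  cols.foldl (fun heights col =>
    heights ++ [if '#' ∈ col then
        -- col[::-1].index("#"): '#' ∈ col guarantees index? returns some (getD never fires)
        (col.length : Int) - (((PySem.List.index? col.reverse '#').getD 0 : Nat) : Int) - 1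
      else 0]) []

-- ===== PORT B =====
def schematic_to_heights_alt (schematic : List String) : List Int :=
  match schematic with
  | [] => []
  | s :: rest =>
    let rows := (s :: rest).map String.toList
    -- n = min(len(r) for r in schematic)
    let n : Nat := (PySem.List.min? (rows.map List.length) (fun x => x)).getD 0
    let heights : List Int := List.replicate n 0
    (PySem.List.enumerate rows 0).foldl
      (fun h jr =>
        -- for i, ch in enumerate(row[:n]): if ch == '#': heights[i] = j
        (PySem.List.enumerate (PySem.List.slice jr.2 none (some (n : Int))) 0).foldl
          (fun h' ic => if ic.2 = '#' then PySem.List.pySetD h' ic.1 jr.1 else h') h)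
      heights

-- ===== PRECONDITION & SPEC =====
def Spec_schematic_to_heights (schematic : List String) (out : List Int) : Prop := out = schematic_to_heights_alt schematic
instance (schematic : List String) (out : List Int) : Decidable (Spec_schematic_to_heights schematic out) := by unfold Spec_schematic_to_heights; infer_instance

-- ===== CLAIM (what is proved, stated in full; the proofs are below) =====
def Claim_equal_schematic_to_heights : Prop := ∀ (schematic : List String), Dom_schematic_to_heights schematic → Spec_schematic_to_heights schematic (schematic_to_heights schematic)

-- ===== LEMMAS AND PROOFS =====

-- the minimum row length: the number of columns zip(*rows) keeps
def mlen : List (List Char) → Nat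
  | [] => 0
  | r :: rs => rs.foldl (fun a q => min a q.length) r.length

-- the value both programs compute for column k: the row index of the last '#'
def colFold (rows : List (List Char)) (k : Nat) : Int :=
  (PySem.List.enumerate rows 0).foldl (fun a jr => if jr.2.getD k ' ' = '#' then jr.1 else a) 0

theorem mlen_cons (r : List Char) (rs : List (List Char)) :
    mlen (r :: rs) = (rs.map List.length).foldl min r.length := by
  simp [mlen, List.foldl_map]

theorem mlen_le (r : List Char) (rs : List (List Char)) :
    mlen (r :: rs) ≤ r.length ∧ ∀ q ∈ rs, mlen (r :: rs) ≤ q.length := by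
  rw [mlen_cons]
  refine ⟨(PySem.List.foldl_min_le _ _).1, fun q hq => ?_⟩
  exact (PySem.List.foldl_min_le (rs.map List.length) r.length).2 q.length (List.mem_map_of_mem hq)

theorem foldl_min_sub_one (ls : List (List Char)) (a : Nat) :
    ls.foldl (fun acc q => min acc (q.length - 1)) (a - 1) = (ls.foldl (fun acc q => min acc q.length) a) - 1 := by
  induction ls generalizing a with
  | nil => rfl
  | cons x t ih => simp [List.foldl_cons, ← ih, Nat.sub_min_sub_right]

theorem mlen_tails (r : List Char) (rs : List (List Char)) :
    mlen ((r :: rs).map List.tail) = mlen (r :: rs) - 1 := by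
  show (rs.map List.tail).foldl (fun a q => min a q.length) r.tail.length = _
  rw [List.foldl_map]
  simp only [List.length_tail]
  exact foldl_min_sub_one rs r.length

theorem mlen_pos_of_all (r : List Char) (rs : List (List Char))
    (h : (r :: rs).all (fun l => !l.isEmpty) = true) : 0 < mlen (r :: rs) := by
  rw [mlen_cons]
  simp only [List.all_cons, Bool.and_eq_true, List.all_eq_true] at h
  rcases (PySem.List.foldl_min_mem (rs.map List.length) r.length) with he | hm
  · rw [he]; cases r with
    | nil => simp at h
    | cons a t => simp
  · rcases List.mem_map.mp hm with ⟨q, hq, hlen⟩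
    have := h.2 q hq
    rw [← hlen]
    cases q with
    | nil => simp at this
    | cons a t => simp

theorem mlen_zero_of_not_all (r : List Char) (rs : List (List Char))
    (h : ¬ (r :: rs).all (fun l => !l.isEmpty) = true) : mlen (r :: rs) = 0 := by
  simp only [List.all_cons, Bool.and_eq_true, List.all_eq_true, not_and_or, not_forall] at h
  rcases h with h | h
  · have : r = [] := by cases r <;> simp_all
    subst this
    exact Nat.eq_zero_of_le_zero (mlen_le [] rs).1
  · rcases h with ⟨q, hq, hne⟩
    have : q = [] := by cases q <;> simp_all
    subst this
    exact Nat.eq_zero_of_le_zero ((mlen_le r rs).2 [] (by simpa using hq))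

-- zip(*rows) is the list of the first mlen columns
theorem pyZipStar_eq (rows : List (List Char)) :
    pyZipStar rows = (List.range (mlen rows)).map (fun i => rows.map (fun r => r.getD i ' ')) := by
  induction rows using pyZipStar.induct with
  | case1 => simp [pyZipStar, mlen]
  | case2 r rs h ih =>
    rw [pyZipStar, if_pos h, ih, mlen_tails]
    have hpos := mlen_pos_of_all r rs h
    obtain ⟨m, hm⟩ : ∃ m, mlen (r :: rs) = m + 1 := ⟨mlen (r :: rs) - 1, by omega⟩
    rw [hm]
    simp only [Nat.add_sub_cancel, List.range_succ_eq_map, List.map_cons, List.map_map]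
    congr 1
    · simp [List.head?_eq_getElem?]
    · apply List.map_congr_left
      intro i _
      simp [Function.comp]
  | case3 r rs h =>
    rw [pyZipStar, if_neg h, mlen_zero_of_not_all r rs h]
    simp

theorem enumerate_map {α β : Type} (f : α → β) (l : List α) (s : Int) :
    PySem.List.enumerate (l.map f) s = (PySem.List.enumerate l s).map (fun p => (p.1, f p.2)) := by
  induction l generalizing s with
  | nil => simp [PySem.List.enumerate_nil]
  | cons x t ih => simp [PySem.List.enumerate_cons, ih]

-- A's per-column value = forward last-'#' fold over the column
theorem aval_eq_foldl (col : List Char) :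
    (if '#' ∈ col then (col.length : Int) - (((PySem.List.index? col.reverse '#').getD 0 : Nat) : Int) - 1 else 0)
    = (PySem.List.enumerate col 0).foldl (fun a jc => if jc.2 = '#' then jc.1 else a) 0 := by
  induction col using List.reverseRecOn with
  | nil => simp
  | append_singleton t c ih =>
    rw [PySem.List.enumerate_append, List.foldl_append]
    simp only [PySem.List.enumerate_nil, PySem.List.enumerate_cons, List.foldl_cons, List.foldl_nil]
    by_cases hc : c = '#'
    · subst hc
      rw [List.reverse_append]
      simp
    · rw [List.reverse_append]
      simp only [List.reverse_singleton, List.singleton_append]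
      rw [PySem.List.index?_cons_of_ne t.reverse hc]
      by_cases hm : '#' ∈ t
      · have : '#' ∈ t.reverse := by simpa using hm
        rcases Option.isSome_iff_exists.mp ((PySem.List.index?_isSome_iff t.reverse '#').2 this) with ⟨k, hk⟩
        have hmem : '#' ∈ t ++ [c] := by simp [hm]
        rw [hk] at ih ⊢
        simp only [if_pos hm] at ih
        simp [hmem, hc, ← ih]
      · have hmem : ¬ '#' ∈ t ++ [c] := by
          simp [hm]
          exact fun h => hc h.symm
        have : ¬ '#' ∈ t.reverse := by simpa using hm
        simp only [if_neg hm] at ih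
        simp [hmem, hc, ← ih]

-- A's per-column value, taken at column k of rows, is colFold rows k
theorem aval_col (rows : List (List Char)) (k : Nat) :
    (if '#' ∈ rows.map (fun r => r.getD k ' ') then
        ((rows.map (fun r => r.getD k ' ')).length : Int)
          - (((PySem.List.index? (rows.map (fun r => r.getD k ' ')).reverse '#').getD 0 : Nat) : Int) - 1
      else 0) = colFold rows k := by
  rw [aval_eq_foldl, colFold, enumerate_map, List.foldl_map]

-- B's inner loop: one row's '#'-positions overwrite the heights list at those columns
theorem inner_fold (l : List Char) (j : Int) :
    ∀ (s : Nat) (h : List Int), s + l.length ≤ h.length →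
    (((PySem.List.enumerate l (s : Int)).foldl
        (fun h' ic => if ic.2 = '#' then PySem.List.pySetD h' ic.1 j else h') h).length = h.length ∧
     ∀ k : Nat, ((PySem.List.enumerate l (s : Int)).foldl
        (fun h' ic => if ic.2 = '#' then PySem.List.pySetD h' ic.1 j else h') h).getD k 0
        = if s ≤ k ∧ k < s + l.length ∧ l.getD (k - s) ' ' = '#' then j else h.getD k 0) := by
  induction l with
  | nil =>
    intro s h _
    refine ⟨by simp [PySem.List.enumerate_nil], fun k => ?_⟩
    rw [PySem.List.enumerate_nil]
    simp only [List.foldl_nil]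
    rw [if_neg]
    rintro ⟨h1, h2, _⟩
    simp at h2
    omega
  | cons c t ih =>
    intro s h hlen
    rw [PySem.List.enumerate_cons]
    simp only [List.foldl_cons]
    have hs1 : (s : Int) + 1 = ((s + 1 : Nat) : Int) := by push_cast; ring
    set h1 : List Int := if c = '#' then PySem.List.pySetD h (s : Int) j else h with hh1
    have hlen1 : h1.length = h.length := by
      rw [hh1]; split_ifs <;> simp
    have hget1 : ∀ k : Nat, h1.getD k 0 = if k = s ∧ c = '#' then j else h.getD k 0 := by
      intro k
      rw [hh1]
      split_ifs with hc hks hks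
      · rw [PySem.List.pySetD_natCast]
        have hs : s < h.length := by simp at hlen; omega
        rw [hks.1]
        simp [List.getD_eq_getElem?_getD, hs]
      · rw [PySem.List.pySetD_natCast]
        have hknes : ¬ s = k := fun hh => hks ⟨hh.symm, hc⟩
        simp [List.getD_eq_getElem?_getD, hknes]
      · exact absurd hks.2 hc
      · rfl
    rw [hs1]
    obtain ⟨ihlen, ihget⟩ := ih (s + 1) h1 (by simp at hlen ⊢; omega)
    refine ⟨by rw [ihlen, hlen1], fun k => ?_⟩
    rw [ihget k]
    by_cases hk : k = s
    · subst hk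
      rw [if_neg (by rintro ⟨hh, _⟩; omega)]
      rw [hget1 k]
      by_cases hc : c = '#'
      · rw [if_pos ⟨rfl, hc⟩, if_pos ⟨le_refl k, by simp, by simp [hc]⟩]
      · rw [if_neg (fun hh => hc hh.2), if_neg (fun hh => hc (by simpa using hh.2.2))]
    · have hg1 : h1.getD k 0 = h.getD k 0 := by
        rw [hget1 k, if_neg (fun hh => hk hh.1)]
      rw [hg1]
      by_cases hsk : s ≤ k
      · have hks' : s + 1 ≤ k := by omega
        have hgd : (c :: t).getD (k - s) ' ' = t.getD (k - (s + 1)) ' ' := by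
          have : k - s = (k - (s + 1)) + 1 := by omega
          rw [this]
          rfl
        by_cases hin2 : k < s + 1 + t.length
        · by_cases hch : t.getD (k - (s + 1)) ' ' = '#'
          · rw [if_pos ⟨hks', hin2, hch⟩, if_pos ⟨hsk, by simp; omega, by rw [hgd]; exact hch⟩]
          · rw [if_neg (fun hh => hch hh.2.2),
               if_neg (fun hh => hch (by rw [← hgd]; exact hh.2.2))]
        · rw [if_neg (fun hh => hin2 hh.2.1),
             if_neg (fun hh => hin2 (by have := hh.2.1; simp at this; omega))]
      · rw [if_neg (fun hh => hsk (by omega)), if_neg (fun hh => hsk hh.1)]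

-- B's outer loop: after all rows, entry k of the heights list is colFold's running value
theorem outer_fold (n : Nat) (rows : List (List Char)) :
    ∀ (s : Int) (h : List Int), (∀ r ∈ rows, n ≤ r.length) → h.length = n →
    (((PySem.List.enumerate rows s).foldl
        (fun h jr => (PySem.List.enumerate (PySem.List.slice jr.2 none (some (n : Int))) 0).foldl
          (fun h' ic => if ic.2 = '#' then PySem.List.pySetD h' ic.1 jr.1 else h') h) h).length = n ∧
     ∀ k : Nat, k < n →
      ((PySem.List.enumerate rows s).foldl
        (fun h jr => (PySem.List.enumerate (PySem.List.slice jr.2 none (some (n : Int))) 0).foldl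
          (fun h' ic => if ic.2 = '#' then PySem.List.pySetD h' ic.1 jr.1 else h') h) h).getD k 0
        = (PySem.List.enumerate rows s).foldl
            (fun a jr => if jr.2.getD k ' ' = '#' then jr.1 else a) (h.getD k 0)) := by
  induction rows with
  | nil =>
    intro s h _ hlen
    simp [PySem.List.enumerate_nil, hlen]
  | cons r rs ih =>
    intro s h hr hlen
    rw [PySem.List.enumerate_cons]
    simp only [List.foldl_cons]
    have hslice : PySem.List.slice r none (some (n : Int)) = r.take n :=
      PySem.List.slice_to_natCast r n
    have htlen : (r.take n).length = n := by
      simp [List.length_take]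
      exact hr r (List.mem_cons_self)
    obtain ⟨ilen, iget⟩ := inner_fold (r.take n) s 0 h (by rw [htlen, hlen]; omega)
    simp only [Nat.cast_zero, Nat.sub_zero, Nat.zero_add, Nat.zero_le, true_and] at ilen iget
    rw [hslice]
    obtain ⟨olen, oget⟩ := ih (s + 1)
      ((PySem.List.enumerate (r.take n) 0).foldl
        (fun h' ic => if ic.2 = '#' then PySem.List.pySetD h' ic.1 s else h') h)
      (fun q hq => hr q (List.mem_cons_of_mem r hq)) (by rw [ilen, hlen])
    refine ⟨olen, fun k hk => ?_⟩
    rw [oget k hk, iget k]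
    congr 1
    have hgdt : (r.take n).getD k ' ' = r.getD k ' ' := by
      simp [List.getD_eq_getElem?_getD, hk]
    by_cases hch : r.getD k ' ' = '#'
    · rw [if_pos ⟨by rw [htlen]; omega, by rw [hgdt]; exact hch⟩, if_pos hch]
    · rw [if_neg (fun hh => hch (by rw [← hgdt]; exact hh.2)), if_neg hch]

-- A's result, in closed form
theorem A_closed (schematic : List String) :
    schematic_to_heights schematic
      = (List.range (mlen (schematic.map String.toList))).map
          (fun k => colFold (schematic.map String.toList) k) := by
  show (pyZipStar (schematic.map String.toList)).foldl _ [] = _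
  rw [PySem.List.foldl_append_singleton_eq_map, List.nil_append, pyZipStar_eq, List.map_map]
  apply List.map_congr_left
  intro k _
  exact aval_col (schematic.map String.toList) k

-- ===== VERDICT (by name: the statement is the Claim_ definition above) =====
theorem schematic_to_heights_spec : Claim_equal_schematic_to_heights := by
  intro schematic _
  unfold Spec_schematic_to_heights
  rw [A_closed]
  cases schematic with
  | nil => simp [schematic_to_heights_alt, mlen]
  | cons x rest =>
    show _ = (PySem.List.enumerate _ 0).foldl _ _
    set rows : List (List Char) := (x :: rest).map String.toList with hrows
    have hrows' : rows = x.toList :: rest.map String.toList := by rw [hrows]; rfl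
    have hn : (PySem.List.min? (rows.map List.length) (fun y => y)).getD 0 = mlen rows := by
      rw [hrows', List.map_cons, PySem.List.min?_id_cons, Option.getD_some, mlen_cons,
        List.map_map]
    rw [hn]
    have hr : ∀ r ∈ rows, mlen rows ≤ r.length := by
      rw [hrows']
      intro r hrm
      rcases List.mem_cons.mp hrm with rfl | hrm
      · exact (mlen_le _ _).1
      · exact (mlen_le _ _).2 r hrm
    obtain ⟨blen, bget⟩ := outer_fold (mlen rows) rows 0 (List.replicate (mlen rows) 0)
      hr (List.length_replicate)
    apply List.ext_getElem
    · rw [blen]; simp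
    · intro k hk1 hk2
      have hkn : k < mlen rows := by simpa using hk1
      rw [List.getElem_map, List.getElem_range,
        ← List.getD_eq_getElem _ 0 hk2, bget k hkn]
      simp [colFold]
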